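-- pv_equiv track=rewrite | github.com/safeedhaps963-lab/intelligent-resume-analysis-system | backend/app/services/nlp_analyzer.py | get_education_level_score
-- ===== SOURCE A (Python) =====
-- from typing import Dict, List, Tuple, Optional
--
-- def get_education_level_score(education_list: List[Dict]) -> int:
--     """
--     Convert education entries to a numerical level score.
--     """
--     score = 0
--     for edu in education_list:
--         degree = edu.get('degree', '').lower()
--         if any(kw in degree for kw in ['phd', 'doctorate', 'ph.d']):
--             score = max(score, 5)
--         elif any(kw in degree for kw in ['master', 'ms', 'ma', 'mtech', 'mba', 'm.s']):
--             score = max(score, 4)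
--         elif any(kw in degree for kw in ['bachelor', 'bs', 'ba', 'btech', 'be', 'b.s']):
--             score = max(score, 3)
--         elif any(kw in degree for kw in ['associate']):
--             score = max(score, 2)
--         elif any(kw in degree for kw in ['high school', 'diploma']):
--             score = max(score, 1)
--     return score
-- ===== SOURCE B (Python) =====
-- # Flat keyword->level map; priority order in A equals level order, so the
-- # global max over ALL matching keywords (no cascade, no first-match) is the same.
-- KEYWORD_LEVELS = {
--     'phd': 5, 'doctorate': 5, 'ph.d': 5,
--     'master': 4, 'ms': 4, 'ma': 4, 'mtech': 4, 'mba': 4, 'm.s': 4,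
--     'bachelor': 3, 'bs': 3, 'ba': 3, 'btech': 3, 'be': 3, 'b.s': 3,
--     'associate': 2,
--     'high school': 1, 'diploma': 1,
-- }
--
--
-- def get_education_level_score(education_list):
--     """
--     Convert education entries to a numerical level score.
--     """
--     return max((level
--                 for edu in education_list
--                 for kw, level in KEYWORD_LEVELS.items()
--                 if kw in edu.get('degree', '').lower()),
--                default=0)
-- ===== Notes on version B (the rewrite author's own statement) =====
-- stated objective: alternative
-- what changed: The ordered five-branch if/elif priority cascade with a mutable running score is replaced by a flat keyword-to-level map and a single unordered max over every matching (entry, keyword) pair; correctness relies on A's branch priority coinciding with the level order, so the highest matching level equals the first matching group.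
import Mathlib
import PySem

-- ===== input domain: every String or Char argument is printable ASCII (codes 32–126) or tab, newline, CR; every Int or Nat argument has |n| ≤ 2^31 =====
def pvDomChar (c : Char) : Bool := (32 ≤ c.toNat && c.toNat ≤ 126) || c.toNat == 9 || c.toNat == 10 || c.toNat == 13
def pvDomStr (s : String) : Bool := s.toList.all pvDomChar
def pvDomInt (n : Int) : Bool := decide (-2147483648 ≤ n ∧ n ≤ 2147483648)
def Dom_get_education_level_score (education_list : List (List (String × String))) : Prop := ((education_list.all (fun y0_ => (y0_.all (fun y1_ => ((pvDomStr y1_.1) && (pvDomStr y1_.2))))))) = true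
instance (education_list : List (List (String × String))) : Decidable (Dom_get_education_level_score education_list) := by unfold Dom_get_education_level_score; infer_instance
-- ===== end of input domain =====

-- B drops A's ordered if/elif priority cascade: a flat keyword→level map and one
-- unordered max over every matching (entry, keyword) pair (objective: alternative).

-- ===== PORT A =====
def get_education_level_score (education_list : List (List (String × String))) : Int :=
  education_list.foldl (fun score edu =>
    let degree := PySem.Str.lower (PySem.Dict.getD (PySem.Dict.mk edu) "degree" "")
    if ["phd", "doctorate", "ph.d"].any (fun kw => PySem.Str.isIn kw degree) then
      max score 5
    else if ["master", "ms", "ma", "mtech", "mba", "m.s"].any (fun kw => PySem.Str.isIn kw degree) then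
      max score 4
    else if ["bachelor", "bs", "ba", "btech", "be", "b.s"].any (fun kw => PySem.Str.isIn kw degree) then
      max score 3
    else if ["associate"].any (fun kw => PySem.Str.isIn kw degree) then
      max score 2
    else if ["high school", "diploma"].any (fun kw => PySem.Str.isIn kw degree) then
      max score 1
    else
      score) 0

-- ===== PORT B =====
-- B's flat keyword → level map (a dict literal in Source B, iterated in insertion order)
def pvKeywordLevels : List (String × Int) :=
  [("phd", 5), ("doctorate", 5), ("ph.d", 5),
   ("master", 4), ("ms", 4), ("ma", 4), ("mtech", 4), ("mba", 4), ("m.s", 4),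
   ("bachelor", 3), ("bs", 3), ("ba", 3), ("btech", 3), ("be", 3), ("b.s", 3),
   ("associate", 2),
   ("high school", 1), ("diploma", 1)]

def get_education_level_score_alt (education_list : List (List (String × String))) : Int :=
  PySem.List.maxD
    (education_list.flatMap (fun edu =>
      (pvKeywordLevels.filter (fun p =>
        PySem.Str.isIn p.1 (PySem.Str.lower (PySem.Dict.getD (PySem.Dict.mk edu) "degree" "")))).map
        Prod.snd))
    (fun x => x) 0

-- ===== PRECONDITION & SPEC =====
def Spec_get_education_level_score (education_list : List (List (String × String))) (out : Int) : Prop := out = get_education_level_score_alt education_list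
instance (education_list : List (List (String × String))) (out : Int) : Decidable (Spec_get_education_level_score education_list out) := by unfold Spec_get_education_level_score; infer_instance

-- ===== CLAIM (what is proved, stated in full; the proofs are below) =====
def Claim_equal_get_education_level_score : Prop := ∀ (education_list : List (List (String × String))), Dom_get_education_level_score education_list → Spec_get_education_level_score education_list (get_education_level_score education_list)

-- ===== LEMMAS AND PROOFS =====

-- the level of one degree string in B: running max over its matching keywords
def pvMatchFold (d : String) : Int :=
  ((pvKeywordLevels.filter (fun p => PySem.Str.isIn p.1 d)).map Prod.snd).foldl max 0

theorem pvFoldMax_const (l : List Int) (a : Int) (h : ∀ x ∈ l, x ≤ a) :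
    l.foldl max a = a := by
  induction l with
  | nil => rfl
  | cons x t ih =>
    have hx := h x (by simp)
    simp only [List.foldl_cons, max_eq_left hx]
    exact ih (fun y hy => h y (by simp [hy]))

-- fold of max with a nonnegative seed splits off the seed
theorem pvFoldMax_split (l : List Int) (s : Int) (hs : 0 ≤ s) :
    l.foldl max s = max s (l.foldl max 0) := by
  induction l generalizing s with
  | nil => simp [max_eq_left hs]
  | cons x t ih =>
    simp only [List.foldl_cons]
    rw [ih (max s x) (le_trans hs (le_max_left _ _)), ih (max 0 x) (le_max_left _ _)]
    omega

-- a keyword group with constant level L folds to L if any keyword matches, else 0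
theorem pvGroupFold (L : Int) (hL : 0 ≤ L) (q : String × Int → Bool) (g : List (String × Int))
    (hg : ∀ p ∈ g, p.2 = L) :
    ((g.filter q).map Prod.snd).foldl max 0 = if g.any q then L else 0 := by
  induction g with
  | nil => simp
  | cons p t ih =>
    have hp : p.2 = L := hg p (by simp)
    have ht : ∀ r ∈ t, r.2 = L := fun r hr => hg r (by simp [hr])
    by_cases hq : q p = true
    · simp only [List.filter_cons, hq, if_pos, List.map_cons, List.foldl_cons, List.any_cons,
        Bool.true_or, hp, max_eq_right hL]
      apply pvFoldMax_const
      intro x hx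
      rcases List.mem_map.mp hx with ⟨r, hr, rfl⟩
      exact le_of_eq (ht r (List.mem_of_mem_filter hr))
    · rw [Bool.not_eq_true] at hq
      simp only [List.filter_cons, hq, Bool.false_eq_true, if_false, List.any_cons, Bool.false_or]
      exact ih ht

theorem pvFoldMax_nonneg (l : List Int) : 0 ≤ l.foldl max 0 := by
  rw [pvFoldMax_split l 0 le_rfl]; exact le_max_left _ _

theorem pvFoldMax_seed_nonneg (l : List Int) (s : Int) (hs : 0 ≤ s) :
    0 ≤ List.foldl max s l := by
  rw [pvFoldMax_split l s hs]; exact le_trans hs (le_max_left _ _)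

theorem pvFold5 (a b c d e : List Int) :
    List.foldl max (List.foldl max (List.foldl max (List.foldl max (List.foldl max 0 a) b) c) d) e =
    max (max (max (max (List.foldl max 0 a) (List.foldl max 0 b)) (List.foldl max 0 c))
      (List.foldl max 0 d)) (List.foldl max 0 e) := by
  have na : 0 ≤ List.foldl max 0 a := pvFoldMax_nonneg a
  have nb : 0 ≤ List.foldl max (List.foldl max 0 a) b := pvFoldMax_seed_nonneg _ _ na
  have nc : 0 ≤ List.foldl max (List.foldl max (List.foldl max 0 a) b) c :=
    pvFoldMax_seed_nonneg _ _ nb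
  have nd : 0 ≤ List.foldl max (List.foldl max (List.foldl max (List.foldl max 0 a) b) c) d :=
    pvFoldMax_seed_nonneg _ _ nc
  rw [pvFoldMax_split e _ nd, pvFoldMax_split d _ nc, pvFoldMax_split c _ nb,
      pvFoldMax_split b _ na]

-- pvMatchFold equals the group-wise description (the five anys of A's cascade)
theorem pvMatchFold_eq (d : String) :
    pvMatchFold d =
      max (max (max (max
        (if ["phd", "doctorate", "ph.d"].any (fun kw => PySem.Str.isIn kw d) then (5:Int) else 0)
        (if ["master", "ms", "ma", "mtech", "mba", "m.s"].any (fun kw => PySem.Str.isIn kw d) then 4 else 0))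
        (if ["bachelor", "bs", "ba", "btech", "be", "b.s"].any (fun kw => PySem.Str.isIn kw d) then 3 else 0))
        (if ["associate"].any (fun kw => PySem.Str.isIn kw d) then 2 else 0))
        (if ["high school", "diploma"].any (fun kw => PySem.Str.isIn kw d) then 1 else 0) := by
  have hsplit : pvKeywordLevels =
      [("phd", (5:Int)), ("doctorate", 5), ("ph.d", 5)] ++
      [("master", 4), ("ms", 4), ("ma", 4), ("mtech", 4), ("mba", 4), ("m.s", 4)] ++
      [("bachelor", 3), ("bs", 3), ("ba", 3), ("btech", 3), ("be", 3), ("b.s", 3)] ++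
      [("associate", 2)] ++
      [("high school", 1), ("diploma", 1)] := rfl
  set q : String × Int → Bool := fun p => PySem.Str.isIn p.1 d with hq
  unfold pvMatchFold
  rw [hsplit]
  simp only [List.filter_append, List.map_append, List.foldl_append]
  rw [pvFold5]
  rw [pvGroupFold 5 (by norm_num) q _ (by decide),
      pvGroupFold 4 (by norm_num) q _ (by decide),
      pvGroupFold 3 (by norm_num) q _ (by decide),
      pvGroupFold 2 (by norm_num) q _ (by decide),
      pvGroupFold 1 (by norm_num) q _ (by decide)]
  simp [hq, List.any_cons, List.any_nil]

-- A's cascade step equals merging the highest matching level into the score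
theorem pvStep_eq (s : Int) (hs : 0 ≤ s) (d : String) :
    (if ["phd", "doctorate", "ph.d"].any (fun kw => PySem.Str.isIn kw d) then
      max s 5
    else if ["master", "ms", "ma", "mtech", "mba", "m.s"].any (fun kw => PySem.Str.isIn kw d) then
      max s 4
    else if ["bachelor", "bs", "ba", "btech", "be", "b.s"].any (fun kw => PySem.Str.isIn kw d) then
      max s 3
    else if ["associate"].any (fun kw => PySem.Str.isIn kw d) then
      max s 2
    else if ["high school", "diploma"].any (fun kw => PySem.Str.isIn kw d) then
      max s 1
    else
      s) = max s (pvMatchFold d) := by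
  rw [pvMatchFold_eq]
  cases h1 : ["phd", "doctorate", "ph.d"].any (fun kw => PySem.Str.isIn kw d) <;>
    cases h2 : ["master", "ms", "ma", "mtech", "mba", "m.s"].any (fun kw => PySem.Str.isIn kw d) <;>
      cases h3 : ["bachelor", "bs", "ba", "btech", "be", "b.s"].any (fun kw => PySem.Str.isIn kw d) <;>
        cases h4 : ["associate"].any (fun kw => PySem.Str.isIn kw d) <;>
          cases h5 : ["high school", "diploma"].any (fun kw => PySem.Str.isIn kw d) <;>
            simp_all

-- fold of max over a flatMap = fold of the per-entry merged maxima
theorem pvFoldMax_flatMap (xs : List (List (String × String)))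
    (f : List (String × String) → List Int) (s : Int) :
    (xs.flatMap f).foldl max s = xs.foldl (fun a e => (f e).foldl max a) s := by
  induction xs generalizing s with
  | nil => rfl
  | cons e t ih => simp only [List.flatMap_cons, List.foldl_append, List.foldl_cons]; exact ih _

theorem pvLoop_eq (xs : List (List (String × String))) (s : Int) (hs : 0 ≤ s) :
    xs.foldl (fun score edu =>
      let degree := PySem.Str.lower (PySem.Dict.getD (PySem.Dict.mk edu) "degree" "")
      if ["phd", "doctorate", "ph.d"].any (fun kw => PySem.Str.isIn kw degree) then
        max score 5
      else if ["master", "ms", "ma", "mtech", "mba", "m.s"].any (fun kw => PySem.Str.isIn kw degree) then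
        max score 4
      else if ["bachelor", "bs", "ba", "btech", "be", "b.s"].any (fun kw => PySem.Str.isIn kw degree) then
        max score 3
      else if ["associate"].any (fun kw => PySem.Str.isIn kw degree) then
        max score 2
      else if ["high school", "diploma"].any (fun kw => PySem.Str.isIn kw degree) then
        max score 1
      else
        score) s
    = xs.foldl (fun a edu =>
        max a (pvMatchFold (PySem.Str.lower (PySem.Dict.getD (PySem.Dict.mk edu) "degree" "")))) s := by
  induction xs generalizing s with
  | nil => rfl
  | cons e t ih =>
    simp only [List.foldl_cons]
    rw [show (let degree := PySem.Str.lower (PySem.Dict.getD (PySem.Dict.mk e) "degree" "")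
      if ["phd", "doctorate", "ph.d"].any (fun kw => PySem.Str.isIn kw degree) then
        max s 5
      else if ["master", "ms", "ma", "mtech", "mba", "m.s"].any (fun kw => PySem.Str.isIn kw degree) then
        max s 4
      else if ["bachelor", "bs", "ba", "btech", "be", "b.s"].any (fun kw => PySem.Str.isIn kw degree) then
        max s 3
      else if ["associate"].any (fun kw => PySem.Str.isIn kw degree) then
        max s 2
      else if ["high school", "diploma"].any (fun kw => PySem.Str.isIn kw degree) then
        max s 1
      else
        s) = max s (pvMatchFold (PySem.Str.lower (PySem.Dict.getD (PySem.Dict.mk e) "degree" ""))) from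
      pvStep_eq s hs _]
    exact ih _ (le_trans hs (le_max_left _ _))

-- the per-entry fold of matching levels merges as the entry's highest matching level
set_option maxHeartbeats 2000000 in
theorem pvInner (xs : List (List (String × String))) (s : Int) (hs : 0 ≤ s) :
    xs.foldl (fun a edu =>
        max a (pvMatchFold (PySem.Str.lower (PySem.Dict.getD (PySem.Dict.mk edu) "degree" "")))) s
    = xs.foldl (fun a edu =>
        List.foldl max a ((pvKeywordLevels.filter (fun p =>
          PySem.Str.isIn p.1 (PySem.Str.lower (PySem.Dict.getD (PySem.Dict.mk edu) "degree" "")))).map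
          Prod.snd)) s := by
  induction xs generalizing s with
  | nil => rfl
  | cons e t ih =>
    simp only [List.foldl_cons]
    rw [pvFoldMax_split ((pvKeywordLevels.filter (fun p =>
          PySem.Str.isIn p.1 (PySem.Str.lower (PySem.Dict.getD (PySem.Dict.mk e) "degree" "")))).map
          Prod.snd) s hs, ← pvMatchFold]
    exact ih _ (le_trans hs (le_max_left _ _))

-- maxD of a list of nonnegative ints with default 0 is the running-max fold
theorem pvMaxD_eq_foldl (xs : List Int) (h : ∀ x ∈ xs, 0 ≤ x) :
    PySem.List.maxD xs (fun x => x) 0 = xs.foldl max 0 := by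
  cases xs with
  | nil => simp [PySem.List.maxD, PySem.List.max?]
  | cons x t =>
    unfold PySem.List.maxD
    rw [PySem.List.max?_id_cons]
    simp only [Option.getD_some, List.foldl_cons]
    rw [pvFoldMax_split t (max 0 x) (le_max_left _ _),
        max_eq_right (h x (by simp)), pvFoldMax_split t x (h x (by simp))]

-- ===== VERDICT (by name: the statement is the Claim_ definition above) =====
theorem get_education_level_score_spec : Claim_equal_get_education_level_score := by
  intro xs _
  unfold Spec_get_education_level_score get_education_level_score get_education_level_score_alt
  rw [pvMaxD_eq_foldl]
  · rw [pvFoldMax_flatMap, pvLoop_eq xs 0 le_rfl, pvInner xs 0 le_rfl]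
  · intro x hx
    rcases List.mem_flatMap.mp hx with ⟨e, _, hx⟩
    rcases List.mem_map.mp hx with ⟨p, hp, rfl⟩
    have : p ∈ pvKeywordLevels := List.mem_of_mem_filter hp
    fin_cases this <;> norm_num
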